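-- pv_equiv track=rewrite | github.com/Smaug123/spacer | dataset.py | construct_dataset
-- ===== SOURCE A (Python) =====
-- from typing import Tuple, Iterable
--
-- def construct_dataset(original_strings: list[str]) -> Tuple[list[str], list[list[int]]]:
--     input_sequences = []
--     target_sequences = []
--
--     for string in original_strings:
--         target_sequence = []
--         input_sequence = []
--         count = 0
--         while count < len(string):
--             while count < len(string) and string[count] == ' ':
--                 count += 1
--             if count >= len(string):
--                 break
--             if count == len(string) - 1:
--                 input_sequence.append(string[count])
--                 target_sequence.append(1)
--                 break
--
--             input_sequence.append(string[count])
--             if string[count + 1] == ' ':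
--                 target_sequence.append(1)
--             else:
--                 target_sequence.append(0)
--
--             count += 1
--
--         input_sequences.append(''.join(input_sequence))
--         target_sequences.append(target_sequence)
--
--     return input_sequences, target_sequences
-- ===== SOURCE B (Python) =====
-- def construct_dataset(original_strings):
--     input_sequences = []
--     target_sequences = []
--     for string in original_strings:
--         words = [w for w in string.split(' ') if w]
--         input_sequences.append(''.join(words))
--         target = []
--         for w in words:
--             target.extend([0] * (len(w) - 1) + [1])
--         target_sequences.append(target)
--     return input_sequences, target_sequences
-- ===== Notes on version B (the rewrite author's own statement) =====
-- stated objective: simpler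
-- what changed: Replaced A's index-driven nested while loops (manual space skipping and lookahead at string[count+1]) by a word-level decomposition: split each string on ' ', drop empty pieces, join the words for the input and emit [0]*(len(w)-1)+[1] per word for the target.
import Mathlib
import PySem

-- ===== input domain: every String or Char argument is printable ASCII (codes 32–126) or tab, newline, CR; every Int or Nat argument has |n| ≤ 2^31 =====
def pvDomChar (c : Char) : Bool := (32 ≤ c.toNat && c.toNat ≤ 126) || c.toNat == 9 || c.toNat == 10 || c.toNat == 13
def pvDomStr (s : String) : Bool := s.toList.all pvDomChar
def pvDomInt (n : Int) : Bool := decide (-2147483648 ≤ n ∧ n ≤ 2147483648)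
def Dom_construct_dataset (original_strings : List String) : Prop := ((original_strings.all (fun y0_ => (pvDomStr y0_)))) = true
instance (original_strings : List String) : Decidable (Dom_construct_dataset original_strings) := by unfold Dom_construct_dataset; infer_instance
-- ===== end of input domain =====

-- B replaces A's index-driven nested while loops by a split-on-space word decomposition; objective: simpler.

-- ===== PORT A =====
-- A's outer while over `count`: each step either skips a space (inner while),
-- emits the last char with target 1, or emits a char with target 0/1 after a
-- lookahead at the next char; rendered as the structural recursion on the chars.
def construct_dataset_loop : List Char → List Char × List Int
  | [] => ([], [])
  | c :: rest =>
    if c = ' ' then construct_dataset_loop rest          -- inner space-skipping while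
    else
      match rest with
      | [] => ([c], [1])                                 -- count == len(string) - 1
      | d :: _ =>
        let r := construct_dataset_loop rest
        (c :: r.1, (if d = ' ' then (1 : Int) else 0) :: r.2)

def construct_dataset (original_strings : List String) : List String × List (List Int) :=
  original_strings.foldl
    (fun acc s =>
      let r := construct_dataset_loop s.toList
      (acc.1 ++ [String.ofList r.1], acc.2 ++ [r.2]))
    ([], [])

-- ===== PORT B =====
-- words = [w for w in string.split(' ') if w]   (split(' ') with nonempty sep: split? never returns none)
def construct_dataset_words (s : String) : List String :=
  ((PySem.Str.split? s " ").getD []).filter (fun w => w ≠ "")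

def construct_dataset_alt (original_strings : List String) : List String × List (List Int) :=
  original_strings.foldl
    (fun acc s =>
      let words := construct_dataset_words s
      (acc.1 ++ [PySem.Str.join "" words],
       acc.2 ++ [words.foldl (fun t w => t ++ (List.replicate (w.toList.length - 1) 0 ++ [(1 : Int)])) []]))
    ([], [])

-- ===== PRECONDITION & SPEC =====
def Spec_construct_dataset (original_strings : List String) (out : List String × List (List Int)) : Prop := out = construct_dataset_alt original_strings
instance (original_strings : List String) (out : List String × List (List Int)) : Decidable (Spec_construct_dataset original_strings out) := by unfold Spec_construct_dataset; infer_instance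

-- ===== CLAIM (what is proved, stated in full; the proofs are below) =====
def Claim_equal_construct_dataset : Prop := ∀ (original_strings : List String), Dom_construct_dataset original_strings → Spec_construct_dataset original_strings (construct_dataset original_strings)

-- ===== LEMMAS AND PROOFS =====

-- the nonempty maximal space-free blocks of a char list
def pvWordsC : List Char → List (List Char)
  | [] => []
  | c :: rest =>
    if c = ' ' then pvWordsC rest
    else (c :: rest.takeWhile (· ≠ ' ')) :: pvWordsC (rest.dropWhile (· ≠ ' '))
termination_by cs => cs.length
decreasing_by
  · simp
  · simpa using Nat.lt_succ_of_le (List.length_dropWhile_le _ _)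

-- pure mirror of PySem.Chars.splitOn.go's state (current chunk reversed)
def pvRawSplit : List Char → List Char → List (List Char)
  | cur, [] => [cur.reverse]
  | cur, c :: rest => if c = ' ' then cur.reverse :: pvRawSplit [] rest else pvRawSplit (c :: cur) rest

theorem pv_go_eq_rawSplit : ∀ (fuel : Nat) (l cur : List Char) (acc : List (List Char)),
    l.length < fuel →
    PySem.Chars.splitOn.go [' '] fuel l cur acc = acc.reverse ++ pvRawSplit cur l := by
  intro fuel
  induction fuel with
  | zero => intro l cur acc h; omega
  | succ n ih =>
    intro l cur acc h
    match l with
    | [] => simp [PySem.Chars.splitOn.go, pvRawSplit]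
    | c :: rest =>
      by_cases hc : c = ' '
      · subst hc
        simp only [PySem.Chars.splitOn.go]
        rw [if_pos (show ([' '].isPrefixOf (' ' :: rest)) = true by simp [List.isPrefixOf])]
        rw [show List.drop [' '].length (' ' :: rest) = rest from rfl]
        rw [ih rest [] (cur.reverse :: acc) (by simp at h ⊢; omega)]
        simp [pvRawSplit]
      · simp only [PySem.Chars.splitOn.go]
        rw [if_neg (show ¬(([' '].isPrefixOf (c :: rest)) = true) by
          simp [List.isPrefixOf]; exact fun hh => hc hh.symm)]
        rw [ih rest (c :: cur) acc (by simp at h ⊢; omega)]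
        simp [pvRawSplit, hc]

theorem pv_rawSplit_filter : ∀ (l cur : List Char),
    (pvRawSplit cur l).filter (fun w => w ≠ []) =
      (if cur = [] then pvWordsC l
       else (cur.reverse ++ l.takeWhile (· ≠ ' ')) :: pvWordsC (l.dropWhile (· ≠ ' '))) := by
  intro l
  induction l with
  | nil =>
    intro cur
    by_cases hc : cur = [] <;> simp [pvRawSplit, pvWordsC, hc, List.filter]
  | cons c rest ih =>
    intro cur
    by_cases hc : c = ' '
    · subst hc
      have h2 : pvWordsC (' ' :: rest) = pvWordsC rest := by rw [pvWordsC]; simp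
      have hr : pvRawSplit cur (' ' :: rest) = cur.reverse :: pvRawSplit [] rest := by
        simp [pvRawSplit]
      rw [hr, List.filter_cons, ih []]
      by_cases hcur : cur = []
      · simp [hcur, h2]
      · simp [hcur, h2, List.takeWhile, List.dropWhile]
    · by_cases hcur : cur = []
      · subst hcur
        rw [show pvRawSplit [] (c :: rest) = pvRawSplit [c] rest by simp [pvRawSplit, hc]]
        rw [ih [c]]
        simp [pvWordsC, hc]
      · rw [show pvRawSplit cur (c :: rest) = pvRawSplit (c :: cur) rest by simp [pvRawSplit, hc]]
        rw [ih (c :: cur)]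
        simp [hc, hcur, List.takeWhile, List.dropWhile]

theorem pv_splitOn_filter (cs : List Char) :
    (PySem.Chars.splitOn cs [' ']).filter (fun w => w ≠ []) = pvWordsC cs := by
  unfold PySem.Chars.splitOn
  rw [pv_go_eq_rawSplit (cs.length + 1) cs [] [] (Nat.lt_succ_self _)]
  simpa using pv_rawSplit_filter cs []

-- A's loop equals the word decomposition
theorem pv_loop_eq_words : ∀ (cs : List Char),
    construct_dataset_loop cs =
      ((pvWordsC cs).flatten,
       (pvWordsC cs).flatMap (fun w => List.replicate (w.length - 1) 0 ++ [(1 : Int)])) := by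
  intro cs
  induction cs with
  | nil => simp [construct_dataset_loop, pvWordsC]
  | cons c rest ih =>
    rw [construct_dataset_loop.eq_def]
    dsimp only
    by_cases hc : c = ' '
    · subst hc
      rw [if_pos rfl, pvWordsC]
      simpa using ih
    · rw [if_neg hc, pvWordsC]
      simp only [if_neg hc]
      match rest with
      | [] => simp [pvWordsC]
      | d :: tl =>
        by_cases hd : d = ' '
        · subst hd
          have ht : List.takeWhile (fun x => decide (x ≠ ' ')) (' ' :: tl) = [] := by
            simp [List.takeWhile]
          have hdr : List.dropWhile (fun x => decide (x ≠ ' ')) (' ' :: tl) = ' ' :: tl := by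
            simp [List.dropWhile]
          rw [ih, ht, hdr]
          simp
        · have ht : List.takeWhile (fun x => decide (x ≠ ' ')) (d :: tl) =
              d :: List.takeWhile (fun x => decide (x ≠ ' ')) tl := by
            simp [List.takeWhile, hd]
          have hdr : List.dropWhile (fun x => decide (x ≠ ' ')) (d :: tl) =
              List.dropWhile (fun x => decide (x ≠ ' ')) tl := by
            simp [List.dropWhile, hd]
          rw [ih, ht, hdr, pvWordsC]
          simp only [if_neg hd]
          simp [List.replicate_succ]

-- join with empty separator is flatten
theorem pv_join_nil_eq_flatten : ∀ (xss : List (List Char)), PySem.Chars.join [] xss = xss.flatten := by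
  intro xss
  match xss with
  | [] => simp [PySem.Chars.join_nil]
  | [p] => simp [PySem.Chars.join_singleton]
  | p :: q :: rest =>
    rw [PySem.Chars.join_cons_cons, pv_join_nil_eq_flatten (q :: rest)]
    simp

theorem pv_ofList_ne_empty (w : List Char) : (String.ofList w ≠ "") ↔ (w ≠ []) := by
  constructor
  · intro h hw; exact h (by simp [hw])
  · intro h hs
    exact h (by simpa using congrArg String.toList hs)

-- B's per-string words, moved to the char level
theorem pv_bwords (s : String) :
    construct_dataset_words s = (pvWordsC s.toList).map String.ofList := by
  unfold construct_dataset_words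
  have h : PySem.Str.split? s " " =
      some ((PySem.Chars.splitOn s.toList [' ']).map String.ofList) := by
    simp [PySem.Str.split?, PySem.Chars.split?]
  rw [h]
  simp only [Option.getD_some]
  rw [← pv_splitOn_filter s.toList, List.filter_map]
  congr 1
  apply List.filter_congr
  intro w _
  simp only [Function.comp]
  exact decide_eq_decide.mpr (pv_ofList_ne_empty w)

theorem pv_step_eq (s : String) :
    (String.ofList (construct_dataset_loop s.toList).1, (construct_dataset_loop s.toList).2) =
    (PySem.Str.join "" (construct_dataset_words s),
     (construct_dataset_words s).foldl
       (fun t w => t ++ (List.replicate (w.toList.length - 1) 0 ++ [(1 : Int)])) []) := by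
  rw [pv_bwords, pv_loop_eq_words, Prod.mk.injEq]
  constructor
  · rw [show PySem.Str.join "" ((pvWordsC s.toList).map String.ofList) =
        String.ofList (PySem.Chars.join [] (((pvWordsC s.toList).map String.ofList).map String.toList))
      from rfl]
    rw [pv_join_nil_eq_flatten]
    rw [show ((pvWordsC s.toList).map String.ofList).map String.toList = pvWordsC s.toList by
      simp [Function.comp_def]]
  · dsimp only
    rw [PySem.List.foldl_append_eq_flatMap, List.nil_append, List.flatMap_map]
    simp [String.toList_ofList]

theorem construct_dataset_spec : Claim_equal_construct_dataset := by
  intro ss hdom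
  unfold Spec_construct_dataset construct_dataset construct_dataset_alt
  clear hdom
  induction ss using List.reverseRecOn with
  | nil => rfl
  | append_singleton ss s ih =>
    rw [List.foldl_append, List.foldl_append, ih]
    simp only [List.foldl_cons, List.foldl_nil]
    have := pv_step_eq s
    simp only [Prod.mk.injEq] at this
    rw [this.1, this.2]
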